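-- pv_equiv track=rewrite | github.com/ShoumikMajumdar/LeetCode | arrays_adv.py | MaxLengthEvenOdd
-- ===== SOURCE A (Python) =====
-- def MaxLengthEvenOdd(array):
--     """
--     Find max len of subarray where consecutive elemetns are alternative even and odd.
--     Complexity:
--         Space: O(1)
--         Time: O(n)
--     """
--     res  = 1
--     c = 1
--     for i in range(1,len(array)):
--         if array[i] %2 == 0 and array[i-1]%2!=0:
--             c+=1
--             res = max(res,c)
--         elif array[i]%2!=0 and array[i-1]%2 == 0:
--             c+=1
--             res = max(res,c)
--         else:
--             c = 1
--     return res
-- ===== SOURCE B (Python) =====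
-- def MaxLengthEvenOdd(array):
--     # Enumerate the maximal alternating-parity segments one by one; the answer is
--     # the length of the longest such segment (1 for an empty array).
--     n = len(array)
--     best = 1
--     start = 0
--     while start < n:
--         end = start + 1
--         while end < n and array[end] % 2 != array[end - 1] % 2:
--             end += 1
--         best = max(best, end - start)
--         start = end
--     return best
-- ===== Notes on version B (the rewrite author's own statement) =====
-- stated objective: alternative
-- what changed: B enumerates the maximal alternating-parity segments with an outer loop over segment starts and an inner loop scanning to each segment's end, returning the longest segment length, instead of A's single pass with a running counter and best-so-far.
import Mathlib
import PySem

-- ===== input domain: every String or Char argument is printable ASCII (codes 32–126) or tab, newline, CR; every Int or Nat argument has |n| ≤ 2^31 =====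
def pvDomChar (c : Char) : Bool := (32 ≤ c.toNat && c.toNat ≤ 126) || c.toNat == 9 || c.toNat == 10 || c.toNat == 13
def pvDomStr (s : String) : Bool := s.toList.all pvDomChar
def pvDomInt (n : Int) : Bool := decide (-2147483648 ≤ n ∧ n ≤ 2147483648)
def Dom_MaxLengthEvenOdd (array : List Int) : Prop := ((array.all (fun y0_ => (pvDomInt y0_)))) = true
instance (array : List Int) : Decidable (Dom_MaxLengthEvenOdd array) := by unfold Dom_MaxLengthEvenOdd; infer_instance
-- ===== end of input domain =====

-- B enumerates maximal alternating-parity segments (nested loops) and takes the longest,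
-- instead of A's single pass with a running counter (objective: alternative).


-- ===== PORT A =====
-- one loop iteration of A: state (res, c), reads array[i-1] (prev) and array[i] (cur)
def pvStepA (st : Int × Int) (prev cur : Int) : Int × Int :=
  if PySem.Int.mod cur 2 = 0 ∧ PySem.Int.mod prev 2 ≠ 0 then
    (max st.1 (st.2 + 1), st.2 + 1)
  else if PySem.Int.mod cur 2 ≠ 0 ∧ PySem.Int.mod prev 2 = 0 then
    (max st.1 (st.2 + 1), st.2 + 1)
  else (st.1, 1)

def MaxLengthEvenOdd (array : List Int) : Int :=
  -- for i in range(1, len(array)): indices are always in range, so array[i] is pyGetD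
  ((PySem.List.pyRange 1 array.length 1).foldl
      (fun st i => pvStepA st (PySem.List.pyGetD array (i - 1) 0) (PySem.List.pyGetD array i 0))
      (1, 1)).1

-- ===== PORT B =====
-- inner while loop of Source B: advance `end` while end < n and array[end], array[end-1] have different parity
def pvEnd (array : List Int) (e : Nat) : Nat :=
  if h : e < array.length ∧
      PySem.Int.mod (PySem.List.pyGetD array (e : Int) 0) 2 ≠
        PySem.Int.mod (PySem.List.pyGetD array ((e : Int) - 1) 0) 2 then
    pvEnd array (e + 1)
  else e
termination_by array.length - e
decreasing_by exact Nat.sub_succ_lt_self _ _ h.1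

-- the inner loop never moves `end` backwards (needed for pvOuter's termination)
theorem pvEnd_ge (array : List Int) (e : Nat) : e ≤ pvEnd array e := by
  fun_induction pvEnd array e <;> omega

-- outer while loop of Source B: state (best, start)
def pvOuter (array : List Int) (best : Int) (start : Nat) : Int :=
  if h : start < array.length then
    pvOuter array (max best ((pvEnd array (start + 1) : Int) - (start : Int)))
      (pvEnd array (start + 1))
  else best
termination_by array.length - start
decreasing_by have := pvEnd_ge array (start + 1); omega

def MaxLengthEvenOdd_alt (array : List Int) : Int := pvOuter array 1 0

-- ===== PRECONDITION & SPEC =====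
def Spec_MaxLengthEvenOdd (array : List Int) (out : Int) : Prop := out = MaxLengthEvenOdd_alt array
instance (array : List Int) (out : Int) : Decidable (Spec_MaxLengthEvenOdd array out) := by unfold Spec_MaxLengthEvenOdd; infer_instance

-- ===== CLAIM (what is proved, stated in full; the proofs are below) =====
def Claim_equal_MaxLengthEvenOdd : Prop := ∀ (array : List Int), Dom_MaxLengthEvenOdd array → Spec_MaxLengthEvenOdd array (MaxLengthEvenOdd array)

-- ===== LEMMAS AND PROOFS =====

-- A's fold over the list of adjacent pairs
def pvFoldA (q : List (Int × Int)) (st : Int × Int) : Int × Int :=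
  q.foldl (fun st p => pvStepA st p.1 p.2) st

theorem pvFoldA_nil (st : Int × Int) : pvFoldA [] st = st := rfl

theorem pvFoldA_cons (p : Int × Int) (t : List (Int × Int)) (st : Int × Int) :
    pvFoldA (p :: t) st = pvFoldA t (pvStepA st p.1 p.2) := rfl

-- length of the leading alternating run of a pairs list
def pvRun : List (Int × Int) → Nat
  | [] => 0
  | p :: t => if p.1 % 2 = p.2 % 2 then 0 else pvRun t + 1

theorem pv_mod2 (x : Int) : PySem.Int.mod x 2 = x % 2 :=
  PySem.Int.mod_eq_emod_of_pos (by norm_num)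

theorem pvStepA_alt (st : Int × Int) (p : Int × Int)
    (h : ¬ p.1 % 2 = p.2 % 2) :
    pvStepA st p.1 p.2 = (max st.1 (st.2 + 1), st.2 + 1) := by
  simp only [pvStepA, pv_mod2]
  rcases Int.emod_two_eq p.1 with h1 | h1 <;> rcases Int.emod_two_eq p.2 with h2 | h2 <;>
    simp_all

theorem pvStepA_not (st : Int × Int) (p : Int × Int)
    (h : p.1 % 2 = p.2 % 2) :
    pvStepA st p.1 p.2 = (st.1, 1) := by
  simp only [pvStepA, pv_mod2]
  rcases Int.emod_two_eq p.1 with h1 | h1 <;> rcases Int.emod_two_eq p.2 with h2 | h2 <;>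
    simp_all

theorem pv_run_le : ∀ q : List (Int × Int), pvRun q ≤ q.length := by
  intro q; induction q with
  | nil => simp [pvRun]
  | cons p t ih =>
    by_cases h : p.1 % 2 = p.2 % 2 <;> simp [pvRun, h]
    omega

-- res only accumulates maxima of counter values, which do not depend on res
theorem pv_res_max : ∀ (q : List (Int × Int)) (r s c : Int),
    pvFoldA q (max r s, c) = (max r (pvFoldA q (s, c)).1, (pvFoldA q (s, c)).2) := by
  intro q; induction q with
  | nil => simp [pvFoldA_nil]
  | cons p t ih =>
    intro r s c
    by_cases h : p.1 % 2 = p.2 % 2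
    · rw [pvFoldA_cons, pvStepA_not _ p h, pvFoldA_cons, pvStepA_not _ p h]
      exact ih r s 1
    · rw [pvFoldA_cons, pvStepA_alt _ p h, pvFoldA_cons, pvStepA_alt _ p h]
      simp only [max_assoc]
      exact ih r (max s (c + 1)) (c + 1)

theorem pv_fold_ge : ∀ (q : List (Int × Int)) (r c : Int), r ≤ (pvFoldA q (r, c)).1 := by
  intro q; induction q with
  | nil => intro r c; simp [pvFoldA_nil]
  | cons p t ih =>
    intro r c
    by_cases h : p.1 % 2 = p.2 % 2
    · rw [pvFoldA_cons, pvStepA_not _ p h]; exact ih r 1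
    · rw [pvFoldA_cons, pvStepA_alt _ p h]
      exact le_trans (le_max_left _ _) (ih _ _)

-- characterisation of A's fold by the leading alternating run
theorem pv_fold_char : ∀ (q : List (Int × Int)) (r c : Int), 1 ≤ c → c ≤ r →
    (pvFoldA q (r, c)).1 =
      if pvRun q < q.length
      then max r (max (c + pvRun q) ((pvFoldA (q.drop (pvRun q + 1)) (1, 1)).1))
      else max r (c + q.length) := by
  intro q; induction q with
  | nil =>
    intro r c h1 h2
    simp [pvFoldA_nil, pvRun, max_eq_left h2]
  | cons p t ih =>
    intro r c h1 h2
    by_cases h : p.1 % 2 = p.2 % 2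
    · have hrun : pvRun (p :: t) = 0 := by simp [pvRun, h]
      rw [hrun, pvFoldA_cons, pvStepA_not _ p h, if_pos (by simp),
        List.drop_succ_cons, List.drop_zero]
      have hr : r = max r 1 := (max_eq_left (by linarith)).symm
      rw [hr, pv_res_max t r 1 1]
      have hF := pv_fold_ge t 1 1
      simp only [Int.max_def]
      split_ifs <;> omega
    · have hrun : pvRun (p :: t) = pvRun t + 1 := by simp [pvRun, h]
      rw [hrun, pvFoldA_cons, pvStepA_alt _ p h, List.drop_succ_cons]
      rw [ih (max r (c + 1)) (c + 1) (by linarith) (le_max_right _ _)]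
      by_cases hb : pvRun t < t.length
      · rw [if_pos hb, if_pos (by simp; omega)]
        push_cast
        simp only [Int.max_def]
        split_ifs <;> omega
      · rw [if_neg hb, if_neg (by simp; omega)]
        simp only [List.length_cons, Int.max_def]
        push_cast
        split_ifs <;> omega

-- A's index fold over range(1, len) is a fold over adjacent pairs
theorem pv_range_fold_eq_pairs {σ : Type} (g : σ → Int → Int → σ) :
    ∀ (xs : List Int) (init : σ),
      (List.range xs.tail.length).foldl
          (fun st k => g st (xs.getD k 0) (xs.getD (k + 1) 0)) init
        = (xs.zip xs.tail).foldl (fun st p => g st p.1 p.2) init := by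
  intro xs
  induction xs with
  | nil => intro init; simp
  | cons x t ih =>
    intro init
    cases t with
    | nil => simp
    | cons y t' =>
      have hr : List.range (t'.length + 1) = 0 :: (List.range t'.length).map Nat.succ :=
        List.range_succ_eq_map
      simp only [List.tail_cons, List.length_cons, hr, List.foldl_cons, List.foldl_map]
      have := ih (g init ((x :: y :: t').getD 0 0) ((x :: y :: t').getD 1 0))
      simp only [List.tail_cons] at this
      simpa [List.zip_cons_cons] using this

theorem pv_pyRange_fold (xs : List Int) {σ : Type} (g : σ → Int → Int → σ) (init : σ) :
    (PySem.List.pyRange 1 xs.length 1).foldl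
        (fun st i => g st (PySem.List.pyGetD xs (i - 1) 0) (PySem.List.pyGetD xs i 0)) init
      = (xs.zip xs.tail).foldl (fun st p => g st p.1 p.2) init := by
  rw [PySem.List.pyRange_one, List.foldl_map, ← pv_range_fold_eq_pairs g xs init]
  have hlen : ((xs.length : Int) - 1).toNat = xs.tail.length := by
    cases xs <;> simp
  rw [hlen]
  apply PySem.List.foldl_congr_mem
  intro st k _
  have h1 : (1 : Int) + k - 1 = ((k : Nat) : Int) := by omega
  have h2 : (1 : Int) + k = (((k + 1 : Nat)) : Int) := by omega
  rw [h1, h2, PySem.List.pyGetD_natCast, PySem.List.pyGetD_natCast]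

-- the inner while loop computes start-of-scan plus the leading alternating run of the pair suffix
theorem pv_end_char (array : List Int) :
    ∀ (m e : Nat), array.length - e ≤ m → 1 ≤ e →
      pvEnd array e = e + pvRun ((array.zip array.tail).drop (e - 1)) := by
  intro m
  induction m with
  | zero =>
    intro e hm he
    have hge : array.length ≤ e := by omega
    rw [pvEnd, dif_neg (fun hh => absurd hh.1 (not_lt.2 hge))]
    have : (array.zip array.tail).drop (e - 1) = [] := by
      apply List.drop_eq_nil_of_le
      simp only [List.length_zip, List.length_tail]
      omega
    simp [this, pvRun]
  | succ m ih =>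
    intro e hm he
    by_cases hlt : e < array.length
    · have hp : e - 1 < (array.zip array.tail).length := by
        simp only [List.length_zip, List.length_tail]; omega
      have hdrop : (array.zip array.tail).drop (e - 1)
          = (array.zip array.tail)[e - 1] :: (array.zip array.tail).drop e := by
        have h11 : e - 1 + 1 = e := by omega
        rw [List.drop_eq_getElem_cons hp, h11]
      have he1 : e - 1 < array.length := by omega
      have hpair : (array.zip array.tail)[e - 1]
          = (array[e - 1]'he1, array[e]'hlt) := by
        have ht : e - 1 < array.tail.length := by simp [List.length_tail]; omega
        simp only [List.getElem_zip, List.getElem_tail]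
        congr 1
        · congr 1
          omega
      have hcast : ((e : Int) - 1) = (((e - 1 : Nat)) : Int) := by omega
      have hge : PySem.List.pyGetD array (e : Int) 0 = array[e]'hlt := by
        rw [PySem.List.pyGetD_natCast]
        exact List.getD_eq_getElem array 0 hlt
      have hge1 : PySem.List.pyGetD array ((e : Int) - 1) 0 = array[e - 1]'he1 := by
        rw [hcast, PySem.List.pyGetD_natCast]
        exact List.getD_eq_getElem array 0 he1
      rw [pvEnd]
      by_cases hcond : PySem.Int.mod (PySem.List.pyGetD array (e : Int) 0) 2 ≠
          PySem.Int.mod (PySem.List.pyGetD array ((e : Int) - 1) 0) 2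
      · rw [dif_pos ⟨hlt, hcond⟩, ih (e + 1) (by omega) (by omega)]
        have hne : ¬ ((array[e - 1]'he1) % 2 = (array[e]'hlt) % 2) := by
          rw [hge, hge1, pv_mod2, pv_mod2] at hcond
          exact fun hh => hcond hh.symm
        rw [hdrop, hpair]
        simp only [pvRun, if_neg hne]
        have : e + 1 - 1 = e := by omega
        rw [this]
        omega
      · rw [dif_neg (fun hh => hcond hh.2)]
        have heqq : (array[e - 1]'he1) % 2 = (array[e]'hlt) % 2 := by
          rw [hge, hge1, pv_mod2, pv_mod2] at hcond
          rw [not_not] at hcond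
          exact hcond.symm
        rw [hdrop, hpair]
        simp [pvRun, heqq]
    · have hge : array.length ≤ e := by omega
      rw [pvEnd, dif_neg (fun hh => absurd hh.1 (not_lt.2 hge))]
      have : (array.zip array.tail).drop (e - 1) = [] := by
        apply List.drop_eq_nil_of_le
        simp only [List.length_zip, List.length_tail]
        omega
      simp [this, pvRun]

-- the outer loop computes max best (A's fold over the remaining pair suffix)
theorem pv_outer_char (array : List Int) :
    ∀ (k start : Nat) (best : Int), array.length - start ≤ k → start < array.length →
      pvOuter array best start
        = max best ((pvFoldA ((array.zip array.tail).drop start) (1, 1)).1) := by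
  intro k
  induction k with
  | zero => intro start best hk hlt; omega
  | succ k ih =>
    intro start best hk hlt
    have hqlen : ((array.zip array.tail).drop start).length = array.length - 1 - start := by
      simp only [List.length_drop, List.length_zip, List.length_tail]
      omega
    have hend : pvEnd array (start + 1)
        = start + 1 + pvRun ((array.zip array.tail).drop start) := by
      rw [pv_end_char array (array.length - (start + 1)) (start + 1) le_rfl (by omega)]
      simp
    have hrun_le : pvRun ((array.zip array.tail).drop start) ≤ ((array.zip array.tail).drop start).length :=
      pv_run_le _
    rw [pvOuter, dif_pos hlt, hend, pv_fold_char _ 1 1 le_rfl le_rfl]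
    by_cases hbr : pvRun ((array.zip array.tail).drop start) < ((array.zip array.tail).drop start).length
    · have hlt' : start + 1 + pvRun ((array.zip array.tail).drop start) < array.length := by omega
      have hk' : array.length - (start + 1 + pvRun ((array.zip array.tail).drop start)) ≤ k := by omega
      rw [ih _ _ hk' hlt']
      have hdd : (array.zip array.tail).drop (start + 1 + pvRun ((array.zip array.tail).drop start))
          = ((array.zip array.tail).drop start).drop (pvRun ((array.zip array.tail).drop start) + 1) := by
        rw [List.drop_drop]
        congr 1
        omega
      rw [hdd, if_pos hbr]
      simp only [Int.max_def]; split_ifs <;> omega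
    · have heq : start + 1 + pvRun ((array.zip array.tail).drop start) = array.length := by omega
      rw [if_neg hbr, heq, pvOuter, dif_neg (lt_irrefl _)]
      have hql : ((((array.zip array.tail).drop start).length : Nat) : Int)
          = (array.length : Int) - 1 - (start : Int) := by
        rw [hqlen]; omega
      rw [hql]
      simp only [Int.max_def]; split_ifs <;> omega

-- ===== VERDICT (by name: the statement is the Claim_ definition above) =====
theorem MaxLengthEvenOdd_spec : Claim_equal_MaxLengthEvenOdd := by
  intro array _
  unfold Spec_MaxLengthEvenOdd MaxLengthEvenOdd MaxLengthEvenOdd_alt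
  rw [pv_pyRange_fold array pvStepA (1, 1)]
  rcases Nat.eq_zero_or_pos array.length with h0 | h0
  · rw [pvOuter, dif_neg (by omega)]
    rcases List.eq_nil_of_length_eq_zero h0 with rfl
    simp
  · rw [pv_outer_char array array.length 0 1 (by omega) h0]
    simp only [List.drop_zero]
    have h1 : (1 : Int) ≤ (pvFoldA (array.zip array.tail) (1, 1)).1 := pv_fold_ge _ 1 1
    have := max_eq_right h1
    rw [this]
    rfl
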